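-- pv_equiv track=rewrite | github.com/kujan/NGU-scripts | Python/Scripts/classes/stringtest.py | get_inventory_slots
-- ===== SOURCE A (Python) =====
-- def get_inventory_slots(slots):
--     """Get coords for inventory slots from 1 to slots"""
--     i = 1
--     row = 1
--     x_pos = 300
--     y_pos = 330
--     coords = []
--
--     while i <= slots:
--         x = x_pos + (i - (12 * (row - 1))) * 50
--         y = y_pos + ((row - 1) * 50)
--         coords.append((x, y))
--         if i % 12 == 0:
--             row += 1
--         i += 1
--     return coords
-- ===== SOURCE B (Python) =====
-- def get_inventory_slots(slots):
--     """Get coords for inventory slots from 1 to slots"""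
--     if slots < 1:
--         return []
--     template = [300 + 50 * c for c in range(1, 13)]
--     nrows = (slots + 11) // 12
--     grid = []
--     for r in range(nrows):
--         y = 330 + 50 * r
--         grid += [(x, y) for x in template]
--     del grid[slots:]
--     return grid
-- ===== Notes on version B (the rewrite author's own statement) =====
-- stated objective: alternative
-- what changed: Instead of A's slot-by-slot counter loop with mutable row state and a modulus-based row-increment branch, B precomputes one row's x-coordinates once as a template, computes the number of rows in closed form by ceiling division, stamps out whole rows by translating the template, and truncates the over-generated grid to the requested length.
import Mathlib
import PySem

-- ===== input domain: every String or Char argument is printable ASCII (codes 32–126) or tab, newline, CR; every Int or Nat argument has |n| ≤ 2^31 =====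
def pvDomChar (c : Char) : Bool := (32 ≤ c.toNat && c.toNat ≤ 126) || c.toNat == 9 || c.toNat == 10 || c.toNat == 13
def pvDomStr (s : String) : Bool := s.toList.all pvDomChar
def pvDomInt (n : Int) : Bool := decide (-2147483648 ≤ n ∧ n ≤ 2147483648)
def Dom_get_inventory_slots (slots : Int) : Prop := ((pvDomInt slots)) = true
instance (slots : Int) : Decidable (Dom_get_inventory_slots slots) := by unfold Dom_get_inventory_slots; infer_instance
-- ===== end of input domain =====

-- B replaces A's per-slot counter loop (mutable row, modulus branch) by one precomputed row x-template,
-- a closed-form ceiling-division row count, whole-row stamping, and truncation of the over-generated grid.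
-- ===== PORT A =====
-- while i <= slots: append; if i % 12 == 0: row += 1; i += 1   (fuel = slots.toNat bounds the iterations exactly)
def pvALoop (slots : Int) : Nat → Int → Int → List (Int × Int) → List (Int × Int)
  | 0, _, _, coords => coords
  | fuel + 1, i, row, coords =>
    if i ≤ slots then
      pvALoop slots fuel (i + 1)
        (if PySem.Int.mod i 12 = 0 then row + 1 else row)
        (coords ++ [(300 + (i - 12 * (row - 1)) * 50, 330 + (row - 1) * 50)])
    else coords

def get_inventory_slots (slots : Int) : List (Int × Int) :=
  pvALoop slots slots.toNat 1 1 []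

-- ===== PORT B =====
-- template = [300 + 50*c for c in range(1, 13)]
def pvTemplate : List Int := (PySem.List.pyRange 1 13 1).map (fun c => 300 + 50 * c)

-- grid built by stamping whole rows ('for r in range(nrows): grid += [(x, y) for x in template]'),
-- then 'del grid[slots:]' = truncation to the first slots elements (slots ≥ 1 here, so = take)
def get_inventory_slots_alt (slots : Int) : List (Int × Int) :=
  if slots < 1 then []
  else
    let nrows := PySem.Int.floordiv (slots + 11) 12
    let grid := (PySem.List.pyRange 0 nrows 1).foldl
      (fun acc r => acc ++ pvTemplate.map (fun x => (x, 330 + 50 * r))) []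
    grid.take slots.toNat

-- ===== PRECONDITION & SPEC =====
def Spec_get_inventory_slots (slots : Int) (out : List (Int × Int)) : Prop := out = get_inventory_slots_alt slots
instance (slots : Int) (out : List (Int × Int)) : Decidable (Spec_get_inventory_slots slots out) := by unfold Spec_get_inventory_slots; infer_instance

-- ===== CLAIM =====
def Claim_equal_get_inventory_slots : Prop := ∀ (slots : Int), Dom_get_inventory_slots slots → Spec_get_inventory_slots slots (get_inventory_slots slots)

-- ===== LEMMAS AND PROOFS =====

-- closed form both programs are proved equal to: slot k (0-based) sits at column k % 12, row k / 12
def pvPair (k : Nat) : Int × Int := (300 + ((k % 12 : Nat) + 1) * 50, 330 + (k / 12 : Nat) * 50)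

theorem pvALoop_spec (slots : Int) (fuel k : Nat) (coords : List (Int × Int))
    (h : slots.toNat ≤ k + fuel) :
    pvALoop slots fuel ((k : Int) + 1) ((k / 12 : Nat) + 1) coords
      = coords ++ (List.range' k (slots.toNat - k)).map pvPair := by
  induction fuel generalizing k coords with
  | zero =>
    have : slots.toNat - k = 0 := by omega
    simp [pvALoop, this]
  | succ fuel ih =>
    by_cases hle : (k : Int) + 1 ≤ slots
    · have hk : k < slots.toNat := by omega
      have hmod : PySem.Int.mod ((k : Int) + 1) 12 = (((k + 1) % 12 : Nat) : Int) := by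
        rw [show ((k : Int) + 1) = ((k + 1 : Nat) : Int) from by push_cast; ring]
        exact PySem.Int.mod_natCast (k + 1) 12
      have hrow : (if PySem.Int.mod ((k : Int) + 1) 12 = 0 then ((k / 12 : Nat) : Int) + 1 + 1
          else ((k / 12 : Nat) : Int) + 1) = (((k + 1) / 12 : Nat) : Int) + 1 := by
        rw [hmod]
        by_cases h12 : (k + 1) % 12 = 0
        · rw [show (((k + 1) % 12 : Nat) : Int) = 0 from by exact_mod_cast h12, if_pos rfl,
              show (k + 1) / 12 = k / 12 + 1 from by omega]
          push_cast; ring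
        · rw [if_neg (by exact_mod_cast h12), show (k + 1) / 12 = k / 12 from by omega]
      have hx : (k : Int) + 1 - 12 * (((k / 12 : Nat) : Int) + 1 - 1) = ((k % 12 : Nat) : Int) + 1 := by
        have h1 : 12 * (k / 12) + k % 12 = k := Nat.div_add_mod k 12
        push_cast
        omega
      have hrange : List.range' k (slots.toNat - k)
          = k :: List.range' (k + 1) (slots.toNat - (k + 1)) := by
        have : slots.toNat - k = (slots.toNat - (k + 1)) + 1 := by omega
        rw [this, List.range'_succ]
      have ihk := ih (k + 1) (coords ++ [pvPair k]) (by omega)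
      simp only [pvALoop, hle, if_pos, hrow]
      have harg : ((k : Int) + 1 + 1) = (((k + 1 : Nat) : Int) + 1) := by push_cast; ring
      rw [show ((k : Int) + 1 - 12 * (((k / 12 : Nat) : Int) + 1 - 1)) * 50 = (((k % 12 : Nat) : Int) + 1) * 50 by rw [hx],
          show (330 : Int) + (((k / 12 : Nat) : Int) + 1 - 1) * 50 = 330 + ((k / 12 : Nat) : Int) * 50 by ring]
      rw [harg]
      simp only [pvPair] at ihk
      rw [ihk, hrange]
      simp [pvPair]
    · have : slots.toNat ≤ k := by omega
      have h0 : slots.toNat - k = 0 := by omega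
      simp [pvALoop, hle, h0]

-- one stamped row equals the corresponding 12-slot block of the closed form
theorem pvRow (r : Nat) :
    pvTemplate.map (fun x => (x, 330 + 50 * (r : Int)))
      = (List.range 12).map (fun j => pvPair (12 * r + j)) := by
  have ht : pvTemplate = (List.range 12).map (fun j : Nat => 300 + 50 * ((j : Int) + 1)) := by
    decide
  rw [ht, List.map_map]
  apply List.ext_getElem
  · simp
  · intro j h1 h2
    have hj : j < 12 := by simpa using h1
    have hmod : (12 * r + j) % 12 = j := by omega
    have hdiv : (12 * r + j) / 12 = r := by omega
    simp only [List.getElem_map, List.getElem_range, Function.comp, pvPair, hmod, hdiv, Prod.mk.injEq]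
    constructor <;> omega

-- the whole-row stamping fold equals the closed form over 12*R slots
theorem pvGrid (R : Nat) :
    ((List.range R).map (fun k : Nat => (k : Int))).foldl
      (fun acc r => acc ++ pvTemplate.map (fun x => (x, 330 + 50 * r))) []
      = (List.range (12 * R)).map pvPair := by
  induction R with
  | zero => simp
  | succ R ih =>
    rw [List.range_succ, List.map_append, List.foldl_append, ih]
    rw [show 12 * (R + 1) = 12 * R + 12 by ring, List.range_add, List.map_append]
    simp only [List.map_cons, List.map_nil, List.foldl_cons, List.foldl_nil, pvRow, List.map_map]
    simp [Function.comp_def]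

-- ===== VERDICT =====
theorem get_inventory_slots_spec : Claim_equal_get_inventory_slots := by
  intro slots _
  unfold Spec_get_inventory_slots get_inventory_slots get_inventory_slots_alt
  have hA := pvALoop_spec slots slots.toNat 0 [] (by omega)
  simp only [Nat.cast_zero, zero_add, Nat.zero_div, Nat.sub_zero] at hA
  rw [hA]
  by_cases hs : slots < 1
  · have h0 : slots.toNat = 0 := by omega
    simp [hs, h0]
  · simp only [if_neg hs]
    have hpos : (0 : Int) < 12 := by norm_num
    rw [PySem.Int.floordiv_eq_ediv_of_pos hpos]
    set q : Int := (slots + 11) / 12 with hq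
    have hq0 : 0 ≤ q := by omega
    have hrange : PySem.List.pyRange 0 q 1 = (List.range q.toNat).map (fun k : Nat => (k : Int)) := by
      rw [PySem.List.pyRange_one]
      simp
    rw [hrange, pvGrid]
    have hle : slots.toNat ≤ 12 * q.toNat := by omega
    rw [← List.map_take, List.take_range]
    rw [show min slots.toNat (12 * q.toNat) = slots.toNat by omega]
    rw [List.range_eq_range']
    simp
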